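-- pv_equiv track=rewrite | github.com/adrania/sleep-events-detection | detection_functions.py | link_events
-- ===== SOURCE A (Python) =====
-- def switch_events (type, resp_variations=None):
--     ''' Switch the names contained in a predefined list to its default names.
--         · type: event name
--         · resp_variations: amount of respiratory categories to be differenciated.
--             · if "partial": the different categories are grouped into three subcategories.
--             · if "None": all the categories are distinguished.'''
--
--     if resp_variations == 'partial':
--         return {'arousal': ['EEG arousal'],
--                 'resp':['NAN', 'Apnea', 'Hypopnea'],
--                 'desat':['SpO2 desaturation'],
--                 'limb':['Limb movement'],
--                 'stage': ['Sleep stage W', 'Sleep stage N1', 'Sleep stage N2', 'Sleep stage N3', 'Sleep stage R']}.get(type)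
--     else:
--         return {'arousal': ['EEG arousal'],
--                 'resp':['NAN', 'Apnea', 'Obstructive apnea', 'Central apnea', 'Mixed apnea', 'Hypopnea', 'Obstructive hypopnea', 'Central hypopnea'],
--                 'desat':['SpO2 desaturation'],
--                 'limb':['Limb movement'],
--                 'stage': ['Sleep stage W', 'Sleep stage N1', 'Sleep stage N2', 'Sleep stage N3', 'Sleep stage R']}.get(type)
--
-- def link_events (events_list, resp_variations=None):
--     '''Return two lists, one with events real names and other with each corresponding regression positions'''
--
--     idx_reg_pos = []
--     events_names = []
--
--     for event in events_list:
--         e_name = switch_events(event, resp_variations)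
--         events_names.append(e_name)
--
--     for num, eve in enumerate(events_names):
--         for e in eve:
--             idx_reg_pos.append(num)
--
--     events_names = [item for sublist in events_names for item in sublist]
--
--     return idx_reg_pos, events_names
-- ===== SOURCE B (Python) =====
-- def switch_events(type, resp_variations=None):
--     if resp_variations == 'partial':
--         return {'arousal': ['EEG arousal'],
--                 'resp': ['NAN', 'Apnea', 'Hypopnea'],
--                 'desat': ['SpO2 desaturation'],
--                 'limb': ['Limb movement'],
--                 'stage': ['Sleep stage W', 'Sleep stage N1', 'Sleep stage N2', 'Sleep stage N3', 'Sleep stage R']}.get(type)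
--     else:
--         return {'arousal': ['EEG arousal'],
--                 'resp': ['NAN', 'Apnea', 'Obstructive apnea', 'Central apnea', 'Mixed apnea', 'Hypopnea', 'Obstructive hypopnea', 'Central hypopnea'],
--                 'desat': ['SpO2 desaturation'],
--                 'limb': ['Limb movement'],
--                 'stage': ['Sleep stage W', 'Sleep stage N1', 'Sleep stage N2', 'Sleep stage N3', 'Sleep stage R']}.get(type)
--
--
-- def link_events(events_list, resp_variations=None):
--     '''Return two lists, one with events real names and other with each corresponding regression positions'''
--     idx_reg_pos = []
--     events_names = []
--     for num, event in enumerate(events_list):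
--         for item in switch_events(event, resp_variations):
--             idx_reg_pos.append(num)
--             events_names.append(item)
--     return idx_reg_pos, events_names
-- ===== Notes on version B (the rewrite author's own statement) =====
-- stated objective: simpler
-- what changed: Replaces A's three passes (build a list of mapped name-lists, then a second enumerate loop for indices, then a flatten comprehension) with one fused enumerate loop that appends to both output lists directly, with no intermediate list-of-lists.
import Mathlib
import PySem

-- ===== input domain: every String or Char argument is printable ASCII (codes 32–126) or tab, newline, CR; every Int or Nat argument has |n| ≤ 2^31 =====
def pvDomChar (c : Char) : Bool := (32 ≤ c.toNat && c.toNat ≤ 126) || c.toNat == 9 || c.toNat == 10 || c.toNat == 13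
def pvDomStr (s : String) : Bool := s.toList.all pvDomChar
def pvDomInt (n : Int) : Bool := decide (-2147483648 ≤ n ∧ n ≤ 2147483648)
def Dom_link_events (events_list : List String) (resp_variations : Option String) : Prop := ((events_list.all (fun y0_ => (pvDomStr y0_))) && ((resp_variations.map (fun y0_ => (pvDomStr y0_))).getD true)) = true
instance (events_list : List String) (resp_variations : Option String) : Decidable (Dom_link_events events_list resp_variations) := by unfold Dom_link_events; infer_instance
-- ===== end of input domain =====

-- B fuses A's three passes into one enumerate loop appending to both output lists (simpler; return value only, neither mutates arguments).

-- ===== PORT A =====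
-- the 'partial' dict literal of switch_events
def pvTableP : PySem.Dict String (List String) := PySem.Dict.ofList
  [("arousal", ["EEG arousal"]),
   ("resp", ["NAN", "Apnea", "Hypopnea"]),
   ("desat", ["SpO2 desaturation"]),
   ("limb", ["Limb movement"]),
   ("stage", ["Sleep stage W", "Sleep stage N1", "Sleep stage N2", "Sleep stage N3", "Sleep stage R"])]
-- the default dict literal of switch_events
def pvTableF : PySem.Dict String (List String) := PySem.Dict.ofList
  [("arousal", ["EEG arousal"]),
   ("resp", ["NAN", "Apnea", "Obstructive apnea", "Central apnea", "Mixed apnea", "Hypopnea", "Obstructive hypopnea", "Central hypopnea"]),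
   ("desat", ["SpO2 desaturation"]),
   ("limb", ["Limb movement"]),
   ("stage", ["Sleep stage W", "Sleep stage N1", "Sleep stage N2", "Sleep stage N3", "Sleep stage R"])]

-- switch_events as used by A (none = Python's None)
def switch_events_A (t : String) (resp_variations : Option String) : Option (List String) :=
  if resp_variations = some "partial" then pvTableP.get? t else pvTableF.get? t

-- A: first loop builds the list of mapped values, second loop emits one index per
-- inner element, the comprehension flattens.  Where switch_events returns None the
-- Python raises TypeError ('for e in None'); Pre_ excludes that, '.getD []' there.
def link_events (events_list : List String) (resp_variations : Option String) : List Int × List String :=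
  let events_names : List (Option (List String)) :=
    events_list.foldl (fun acc event => acc ++ [switch_events_A event resp_variations]) []
  let idx_reg_pos : List Int :=
    (PySem.List.enumerate events_names).foldl
      (fun acc p => (p.2.getD []).foldl (fun a _ => a ++ [p.1]) acc) []
  let flat : List String := events_names.foldl (fun acc o => acc ++ o.getD []) []
  (idx_reg_pos, flat)

-- ===== PORT B =====
-- switch_events as written in Source B (same table, B's own helper)
def switch_events_B (t : String) (resp_variations : Option String) : Option (List String) :=
  if resp_variations = some "partial" then pvTableP.get? t else pvTableF.get? t

-- B: one fused enumerate loop appending to both lists ('.getD []' = the raising None case, excluded by Pre_)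
def link_events_alt (events_list : List String) (resp_variations : Option String) : List Int × List String :=
  (PySem.List.enumerate events_list).foldl
    (fun acc p =>
      ((switch_events_B p.2 resp_variations).getD []).foldl
        (fun a item => (a.1 ++ [p.1], a.2 ++ [item])) acc)
    ([], [])

-- ===== PRECONDITION & SPEC =====
-- Pre_ excludes exactly the inputs where some event is not a key of the dict: there
-- switch_events returns None and Python A raises TypeError iterating it (B raises too).
def Pre_link_events (events_list : List String) (resp_variations : Option String) : Prop :=
  ∀ e ∈ events_list, e ∈ ["arousal", "resp", "desat", "limb", "stage"]
instance (events_list : List String) (resp_variations : Option String) : Decidable (Pre_link_events events_list resp_variations) := by unfold Pre_link_events; infer_instance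
def pvWitness_link_events : List String × Option String := (["resp", "arousal", "resp"], some "partial")

def Spec_link_events (events_list : List String) (resp_variations : Option String) (out : List Int × List String) : Prop := out = link_events_alt events_list resp_variations
instance (events_list : List String) (resp_variations : Option String) (out : List Int × List String) : Decidable (Spec_link_events events_list resp_variations out) := by unfold Spec_link_events; infer_instance

-- ===== CLAIM (what is proved, stated in full; the proofs are below) =====
def Claim_equal_link_events : Prop := ∀ (events_list : List String) (resp_variations : Option String), Dom_link_events events_list resp_variations → Pre_link_events events_list resp_variations → Spec_link_events events_list resp_variations (link_events events_list resp_variations)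

-- ===== LEMMAS AND PROOFS =====

-- reference result used only by the proofs: the per-event contribution, indices from s
def pvRef : List (Option (List String)) → Int → List Int × List String
  | [], _ => ([], [])
  | o :: t, s =>
    let r := pvRef t (s + 1)
    ((o.getD []).map (fun _ => s) ++ r.1, o.getD [] ++ r.2)

lemma switch_AB (t : String) (rv : Option String) : switch_events_B t rv = switch_events_A t rv := rfl

lemma A_idx (ns : List (Option (List String))) : ∀ (s : Int) (acc : List Int),
    (PySem.List.enumerate ns s).foldl (fun acc p => (p.2.getD []).foldl (fun a _ => a ++ [p.1]) acc) acc
      = acc ++ (pvRef ns s).1 := by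
  induction ns with
  | nil => simp [PySem.List.enumerate_nil, pvRef]
  | cons o t ih =>
    intro s acc
    rw [PySem.List.enumerate_cons, List.foldl_cons, ih]
    simp [pvRef]

lemma A_flat (ns : List (Option (List String))) : ∀ (s : Int) (acc : List String),
    ns.foldl (fun acc o => acc ++ o.getD []) acc = acc ++ (pvRef ns s).2 := by
  induction ns with
  | nil => simp [pvRef]
  | cons o t ih =>
    intro s acc
    rw [List.foldl_cons, ih (s + 1)]
    simp [pvRef]

lemma B_inner (m : List String) (c : Int) : ∀ (acc : List Int × List String),
    m.foldl (fun a item => (a.1 ++ [c], a.2 ++ [item])) acc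
      = (acc.1 ++ m.map (fun _ => c), acc.2 ++ m) := by
  induction m with
  | nil => simp
  | cons x t ih => intro acc; simp [ih, List.append_assoc]

lemma B_main (rv : Option String) (el : List String) : ∀ (s : Int) (acc : List Int × List String),
    (PySem.List.enumerate el s).foldl
        (fun acc p => ((switch_events_B p.2 rv).getD []).foldl
          (fun a item => (a.1 ++ [p.1], a.2 ++ [item])) acc) acc
      = (acc.1 ++ (pvRef (el.map (fun e => switch_events_A e rv)) s).1,
         acc.2 ++ (pvRef (el.map (fun e => switch_events_A e rv)) s).2) := by
  induction el with
  | nil => simp [PySem.List.enumerate_nil, pvRef]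
  | cons e t ih =>
    intro s acc
    rw [PySem.List.enumerate_cons, List.foldl_cons, B_inner, ih]
    simp [pvRef, switch_AB]

-- ===== VERDICT (by name: the statement is the Claim_ definition above) =====
theorem link_events_spec : Claim_equal_link_events := by
  intro el rv _ _
  show link_events el rv = link_events_alt el rv
  simp only [link_events, link_events_alt]
  rw [PySem.List.foldl_append_singleton_eq_map, A_idx, A_flat _ 0, B_main]
  simp
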